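-- pv_equiv track=rewrite | github.com/indyjrgith/botvocirecenti | FixPortale.py | extract_lua_longstring
-- ===== SOURCE A (Python) =====
-- def extract_lua_longstring(text, pos):
--     while pos < len(text) and text[pos] in ' \t\n\r,':
--         pos += 1
--     if pos >= len(text):
--         return None, pos
--     if text[pos] == '[':
--         level = 0
--         p = pos + 1
--         while p < len(text) and text[p] == '=':
--             level += 1
--             p += 1
--         if p < len(text) and text[p] == '[':
--             open_delim = '[' + '=' * level + '['
--             close_delim = ']' + '=' * level + ']'
--             start = p + 1
--             end = text.find(close_delim, start)
--             if end == -1: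
--                 return None, pos
--             return text[start:end], end + len(close_delim)
--     if text[pos] in ('"', "'"):
--         q = text[pos]
--         start = pos + 1
--         end = text.find(q, start)
--         if end == -1:
--             return None, pos
--         return text[start:end], end + 1
--     return None, pos
-- ===== SOURCE B (Python) =====
-- _SEPS = ' \t\n\r,'
--
--
-- def _scan_until(text, start, delim):
--     # Stream characters from `start` into a buffer, stopping at the first
--     # position where `delim` begins; (content, position after delim) or (None, -1).
--     buf = []
--     i = start
--     last = len(text) - len(delim)
--     while i <= last:
--         if text.startswith(delim, i):
--             return ''.join(buf), i + len(delim)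
--         buf.append(text[i])
--         i += 1
--     return None, -1
--
--
-- def extract_lua_longstring(text, pos):
--     rest = text[pos:]
--     skipped = pos + len(rest) - len(rest.lstrip(_SEPS))
--     if skipped >= len(text):
--         return None, skipped
--     c = text[skipped]
--     if c == '[':
--         tail = text[skipped + 1:]
--         level = len(tail) - len(tail.lstrip('='))
--         if skipped + 1 + level < len(text) and text[skipped + 1 + level] == '[':
--             s, p = _scan_until(text, skipped + 2 + level, ']' + '=' * level + ']')
--             return (s, p) if s is not None else (None, skipped)
--     if c in '"\'':
--         s, p = _scan_until(text, skipped + 1, c)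
--         return (s, p) if s is not None else (None, skipped)
--     return None, skipped
-- ===== Notes on version B (the rewrite author's own statement) =====
-- stated objective: alternative
-- what changed: Replaces A's mutate-and-scan loops and str.find+slice extraction with arithmetic on lstrip lengths for the separator/'=' runs and a single generic streaming scanner that builds the content character by character into a buffer while detecting the close delimiter inline (unified for long brackets and quotes).
-- outside the precondition, e.g. on extract_lua_longstring("'[ c", -4): A returns (None, -4), B returns ('[ c', 1)
import Mathlib
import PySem

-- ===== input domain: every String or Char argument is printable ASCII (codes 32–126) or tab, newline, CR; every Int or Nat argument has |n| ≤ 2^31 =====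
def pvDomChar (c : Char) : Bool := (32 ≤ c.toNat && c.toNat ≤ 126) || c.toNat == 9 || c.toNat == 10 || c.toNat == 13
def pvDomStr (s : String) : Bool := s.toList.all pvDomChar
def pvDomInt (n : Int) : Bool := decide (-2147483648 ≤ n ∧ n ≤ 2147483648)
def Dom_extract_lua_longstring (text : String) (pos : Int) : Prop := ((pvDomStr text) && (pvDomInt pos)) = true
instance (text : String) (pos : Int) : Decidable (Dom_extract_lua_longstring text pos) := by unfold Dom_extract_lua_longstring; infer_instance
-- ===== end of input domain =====

-- B replaces A's mutate-and-scan loops and find+slice extraction by lstrip-length arithmetic for the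
-- separator/'=' runs and one generic streaming scanner that accumulates the content character by
-- character while detecting the close delimiter inline; same outputs, no speed claim.

-- ===== PORT A =====
-- while pos < len(text) and text[pos] in ' \t\n\r,': pos += 1
def pvSkipA (cs : List Char) (pos : Int) : Int :=
  if _h : pos < (cs.length : Int) then
    match PySem.List.pyGet? cs pos with
    | some c => if c ∈ [' ', '\t', '\n', '\r', ','] then pvSkipA cs (pos + 1) else pos
    | none => pos   -- IndexError in Python (pos < -len(text)); excluded by Pre_
  else pos
termination_by ((cs.length : Int) - pos).toNat
decreasing_by omega

-- while p < len(text) and text[p] == '=': level += 1; p += 1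
def pvEqLoopA (cs : List Char) (level : Nat) (p : Int) : Nat × Int :=
  if h : p < (cs.length : Int) ∧ PySem.List.pyGet? cs p = some '=' then
    pvEqLoopA cs (level + 1) (p + 1)
  else (level, p)
termination_by ((cs.length : Int) - p).toNat
decreasing_by obtain ⟨h1, _⟩ := h; omega

-- the final `if text[pos] in ('"', "'"): … / return None, pos` part of A, reached by fall-through
def pvQuoteA (cs : List Char) (pos : Int) (c : Char) : Option String × Int :=
  if c = '"' ∨ c = '\'' then
    let start := pos + 1
    let endd := PySem.Chars.findFrom cs [c] start none
    if endd = -1 then (none, pos)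
    else (some (String.ofList (PySem.List.slice cs (some start) (some endd))), endd + 1)
  else (none, pos)

def extract_lua_longstring (text : String) (pos : Int) : Option String × Int :=
  let cs := text.toList
  let pos1 := pvSkipA cs pos
  if pos1 ≥ (cs.length : Int) then (none, pos1)
  else
    match PySem.List.pyGet? cs pos1 with
    | none => (none, pos1)   -- IndexError in Python; excluded by Pre_
    | some c =>
      if c = '[' then
        let lp := pvEqLoopA cs 0 (pos1 + 1)
        if lp.2 < (cs.length : Int) ∧ PySem.List.pyGet? cs lp.2 = some '[' then
          let closeDelim : List Char := ']' :: (List.replicate lp.1 '=' ++ [']'])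
          let start := lp.2 + 1
          let endd := PySem.Chars.findFrom cs closeDelim start none
          if endd = -1 then (none, pos1)
          else (some (String.ofList (PySem.List.slice cs (some start) (some endd))), endd + (closeDelim.length : Int))
        else pvQuoteA cs pos1 c
      else pvQuoteA cs pos1 c

-- ===== PORT B =====
-- the character class of _SEPS = ' \t\n\r,' (lstrip strips members of this set)
def pvSepB (c : Char) : Bool := decide (c ∈ [' ', '\t', '\n', '\r', ','])

-- _scan_until(text, start, delim): stream characters into buf until delim begins.
-- text.startswith(delim, i) reads i as a slice bound; exact as delim.isPrefixOf (slice cs i none).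
def pvScanUntil (cs : List Char) (buf : List Char) (i : Int) (delim : List Char) : Option (List Char) × Int :=
  if _h : i ≤ (cs.length : Int) - (delim.length : Int) then
    if delim.isPrefixOf (PySem.List.slice cs (some i) none) then (some buf, i + (delim.length : Int))
    else
      match PySem.List.pyGet? cs i with
      | some c => pvScanUntil cs (buf ++ [c]) (i + 1) delim
      | none => (none, -1)   -- unreachable for 0 ≤ i, delim ≠ []: then i is in range (buf.append(text[i]))
  else (none, -1)
termination_by ((cs.length : Int) - (delim.length : Int) + 1 - i).toNat
decreasing_by omega

-- the `if c in '"\'': …` tail of B, reached by fall-through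
def pvQuoteB (cs : List Char) (skipped : Int) (c : Char) : Option String × Int :=
  if c = '"' ∨ c = '\'' then
    match pvScanUntil cs [] (skipped + 1) [c] with
    | (some s, p) => (some (String.ofList s), p)
    | (none, _) => (none, skipped)
  else (none, skipped)

def extract_lua_longstring_alt (text : String) (pos : Int) : Option String × Int :=
  let cs := text.toList
  let rest := PySem.List.slice cs (some pos) none
  let skipped := pos + (rest.length : Int) - ((rest.dropWhile pvSepB).length : Int)
  if skipped ≥ (cs.length : Int) then (none, skipped)
  else
    match PySem.List.pyGet? cs skipped with
    | none => (none, skipped)   -- IndexError in Python; excluded by Pre_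
    | some c =>
      if c = '[' then
        let tail := PySem.List.slice cs (some (skipped + 1)) none
        let level := (tail.length : Int) - ((tail.dropWhile (fun c => c == '=')).length : Int)
        if skipped + 1 + level < (cs.length : Int) ∧ PySem.List.pyGet? cs (skipped + 1 + level) = some '[' then
          let delim : List Char := ']' :: (List.replicate level.toNat '=' ++ [']'])
          match pvScanUntil cs [] (skipped + 2 + level) delim with
          | (some s, p) => (some (String.ofList s), p)
          | (none, _) => (none, skipped)
        else pvQuoteB cs skipped c
      else pvQuoteB cs skipped c

-- ===== PRECONDITION & SPEC =====
-- Pre_ excludes negative pos: outside the function's natural domain, A applies Python's negative-index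
-- wraparound (and raises IndexError when pos < -len(text)), while B's slice text[pos:] reads from the end.
def Pre_extract_lua_longstring (_text : String) (pos : Int) : Prop := 0 ≤ pos
instance (text : String) (pos : Int) : Decidable (Pre_extract_lua_longstring text pos) := by unfold Pre_extract_lua_longstring; infer_instance

def pvWitness_extract_lua_longstring : String × Int := (" [=[hi]=] rest", 0)

def Spec_extract_lua_longstring (text : String) (pos : Int) (out : Option String × Int) : Prop := out = extract_lua_longstring_alt text pos
instance (text : String) (pos : Int) (out : Option String × Int) : Decidable (Spec_extract_lua_longstring text pos out) := by unfold Spec_extract_lua_longstring; infer_instance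

-- ===== CLAIM (what is proved, stated in full; the proofs are below) =====
def Claim_equal_extract_lua_longstring : Prop := ∀ (text : String) (pos : Int), Dom_extract_lua_longstring text pos → Pre_extract_lua_longstring text pos → Spec_extract_lua_longstring text pos (extract_lua_longstring text pos)

-- ===== LEMMAS AND PROOFS =====

-- length of the separator run starting at n (A's skip loop / B's lstrip arithmetic)
def pvRun (cs : List Char) (n : Nat) : Nat := ((cs.drop n).takeWhile pvSepB).length
-- length of the '=' run starting at n (A's level loop / B's lstrip('=') arithmetic)
def pvERun (cs : List Char) (n : Nat) : Nat := ((cs.drop n).takeWhile (fun c => c == '=')).length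

lemma pvSep_mem_iff (c : Char) : c ∈ ([' ', '\t', '\n', '\r', ','] : List Char) ↔ pvSepB c = true := by
  simp [pvSepB]

lemma pvSkipA_eq (cs : List Char) (n : Nat) :
    pvSkipA cs (n : Int) = ((n + pvRun cs n : Nat) : Int) := by
  induction hk : cs.length - n generalizing n with
  | zero =>
    rw [pvSkipA, dif_neg (by omega)]
    unfold pvRun
    rw [List.drop_eq_nil_of_le (by omega)]
    simp
  | succ k ih =>
    have hn : n < cs.length := by omega
    have hget : PySem.List.pyGet? cs (n : Int) = some cs[n] := by
      simp [List.getElem?_eq_getElem hn]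
    rw [pvSkipA, dif_pos (by exact_mod_cast hn)]
    simp only [hget]
    unfold pvRun
    rw [List.drop_eq_getElem_cons hn]
    by_cases hc : cs[n] ∈ ([' ', '\t', '\n', '\r', ','] : List Char)
    · have hb : pvSepB cs[n] = true := (pvSep_mem_iff _).mp hc
      rw [if_pos hc, List.takeWhile_cons_of_pos hb]
      rw [show ((n : Int) + 1) = ((n + 1 : Nat) : Int) by push_cast; ring]
      rw [ih (n + 1) (by omega)]
      unfold pvRun
      simp only [List.length_cons]
      omega
    · have hb : ¬ pvSepB cs[n] = true := fun h => hc ((pvSep_mem_iff _).mpr h)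
      rw [if_neg hc, List.takeWhile_cons_of_neg (by simpa using hb)]
      simp

lemma pvEqLoopA_eq (cs : List Char) (lvl : Nat) (n : Nat) :
    pvEqLoopA cs lvl (n : Int) = (lvl + pvERun cs n, ((n + pvERun cs n : Nat) : Int)) := by
  induction hk : cs.length - n generalizing lvl n with
  | zero =>
    rw [pvEqLoopA, dif_neg (by rintro ⟨h1, -⟩; omega)]
    unfold pvERun
    rw [List.drop_eq_nil_of_le (by omega)]
    simp
  | succ k ih =>
    have hn : n < cs.length := by omega
    have hget : PySem.List.pyGet? cs (n : Int) = some cs[n] := by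
      simp [List.getElem?_eq_getElem hn]
    rw [pvEqLoopA]
    unfold pvERun
    rw [List.drop_eq_getElem_cons hn]
    by_cases hc : cs[n] = '='
    · rw [dif_pos ⟨by exact_mod_cast hn, by rw [hget, hc]⟩]
      rw [show ((n : Int) + 1) = ((n + 1 : Nat) : Int) by push_cast; ring]
      rw [ih (lvl + 1) (n + 1) (by omega)]
      rw [List.takeWhile_cons_of_pos (by simp [hc])]
      unfold pvERun
      simp only [List.length_cons, Prod.mk.injEq]
      constructor <;> omega
    · rw [dif_neg (by rintro ⟨-, h2⟩; rw [hget] at h2; exact hc (Option.some.inj h2))]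
      rw [List.takeWhile_cons_of_neg (by simp [hc])]
      simp

lemma pvEqLoopA_eq' (cs : List Char) (m : Nat) :
    pvEqLoopA cs 0 ((m : Int) + 1) = (pvERun cs (m + 1), (m : Int) + 1 + (pvERun cs (m + 1) : Int)) := by
  rw [show ((m : Int) + 1) = ((m + 1 : Nat) : Int) by push_cast; ring, pvEqLoopA_eq]
  refine Prod.ext (by omega) (by push_cast; ring)

-- find.go's counter only shifts the result
lemma pvGoShift (sub t : List Char) (j : Nat) :
    PySem.Chars.find.go sub t j =
      if PySem.Chars.find.go sub t 0 = -1 then -1 else PySem.Chars.find.go sub t 0 + j := by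
  induction t generalizing j with
  | nil =>
    simp only [PySem.Chars.find.go]
    by_cases he : sub.isEmpty <;> simp [he]
  | cons c t ih =>
    simp only [PySem.Chars.find.go]
    by_cases hp : sub.isPrefixOf (c :: t)
    · simp [hp]
    · rw [if_neg hp, if_neg hp, ih (j + 1), ih 1]
      by_cases hz : PySem.Chars.find.go sub t 0 = -1
      · simp [hz]
      · have : -1 ≤ PySem.Chars.find.go sub t 0 := by
          have := PySem.Chars.neg_one_le_find t sub
          simpa [PySem.Chars.find] using this
        rw [if_neg hz, if_neg (by omega), if_neg (by omega)]
        push_cast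
        ring

lemma pvFind_cons_pos (sub : List Char) (c : Char) (t : List Char)
    (h : sub.isPrefixOf (c :: t) = true) : PySem.Chars.find (c :: t) sub = 0 := by
  simp [PySem.Chars.find, PySem.Chars.find.go, h]

lemma pvFind_cons_neg (sub : List Char) (c : Char) (t : List Char)
    (h : ¬ sub.isPrefixOf (c :: t) = true) :
    PySem.Chars.find (c :: t) sub =
      if PySem.Chars.find t sub = -1 then -1 else PySem.Chars.find t sub + 1 := by
  simp only [PySem.Chars.find]
  rw [PySem.Chars.find.go, if_neg h, pvGoShift]
  norm_num

-- the streaming scanner computes exactly find-then-slice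
lemma pvScan_eq (cs delim : List Char) (hd : delim ≠ []) (k : Nat) (hk : k ≤ cs.length)
    (buf : List Char) :
    pvScanUntil cs buf (k : Int) delim =
      if PySem.Chars.find (cs.drop k) delim = -1 then (none, -1)
      else (some (buf ++ (cs.drop k).take (PySem.Chars.find (cs.drop k) delim).toNat),
            (k : Int) + PySem.Chars.find (cs.drop k) delim + (delim.length : Int)) := by
  have hd1 : 1 ≤ delim.length := by
    cases delim with
    | nil => exact absurd rfl hd
    | cons a l => simp
  induction hfuel : cs.length - k generalizing k buf with
  | zero =>
    have hguard : ¬ ((k : Int) ≤ (cs.length : Int) - (delim.length : Int)) := by omega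
    rw [pvScanUntil, dif_neg hguard]
    have hlen : (cs.drop k).length < delim.length := by
      rw [List.length_drop]; omega
    have hfind : PySem.Chars.find (cs.drop k) delim = -1 := by
      rw [PySem.Chars.find_eq_neg_one_iff]
      intro hinf
      exact absurd hinf.length_le (by omega)
    rw [if_pos hfind]
  | succ f ih =>
    by_cases hguard : (k : Int) ≤ (cs.length : Int) - (delim.length : Int)
    · have hklt : k < cs.length := by omega
      have hdropk : cs.drop k = cs[k] :: cs.drop (k + 1) := List.drop_eq_getElem_cons hklt
      rw [pvScanUntil, dif_pos hguard]
      rw [PySem.List.slice_from_natCast]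
      by_cases hp : delim.isPrefixOf (List.drop k cs)
      · rw [if_pos hp]
        have hfind : PySem.Chars.find (cs.drop k) delim = 0 := by
          rw [hdropk] at hp ⊢; exact pvFind_cons_pos _ _ _ hp
        rw [hfind]
        simp
      · rw [if_neg hp]
        have hget : PySem.List.pyGet? cs (k : Int) = some cs[k] := by
          simp [List.getElem?_eq_getElem hklt]
        simp only [hget]
        rw [show ((k : Int) + 1) = ((k + 1 : Nat) : Int) by push_cast; ring]
        rw [ih (k + 1) (by omega) (buf ++ [cs[k]]) (by omega)]
        have hstep : PySem.Chars.find (cs.drop k) delim =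
            if PySem.Chars.find (cs.drop (k + 1)) delim = -1 then -1
            else PySem.Chars.find (cs.drop (k + 1)) delim + 1 := by
          rw [hdropk]
          exact pvFind_cons_neg _ _ _ (by rw [← hdropk]; exact hp)
        by_cases hr : PySem.Chars.find (cs.drop (k + 1)) delim = -1
        · rw [if_pos hr, hstep, if_pos hr]
          simp
        · have hr0 : 0 ≤ PySem.Chars.find (cs.drop (k + 1)) delim := by
            have := PySem.Chars.neg_one_le_find (cs.drop (k + 1)) delim
            omega
          rw [if_neg hr, hstep, if_neg (by omega), if_neg (by omega)]
          have htn : (PySem.Chars.find (cs.drop (k + 1)) delim + 1).toNat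
              = (PySem.Chars.find (cs.drop (k + 1)) delim).toNat + 1 := by omega
          have htake : List.take (PySem.Chars.find (cs.drop (k + 1)) delim + 1).toNat (List.drop k cs)
              = cs[k] :: List.take (PySem.Chars.find (cs.drop (k + 1)) delim).toNat (List.drop (k + 1) cs) := by
            rw [htn, hdropk, List.take_succ_cons]
          rw [htake]
          refine Prod.ext ?_ ?_
          · simp
          · push_cast
            ring
    · rw [pvScanUntil, dif_neg hguard]
      have hfind : PySem.Chars.find (cs.drop k) delim = -1 := by
        rw [PySem.Chars.find_eq_neg_one_iff]
        intro hinf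
        have := hinf.length_le
        rw [List.length_drop] at this
        omega
      rw [if_pos hfind]

-- the A-side find/slice result equals the B-side scan result, for any fall-through value fb
lemma pvFindScan (cs delim : List Char) (hd : delim ≠ []) (k : Nat) (hk : k ≤ cs.length)
    (fb : Option String × Int) :
    (match pvScanUntil cs [] (k : Int) delim with
     | (some s, p) => (some (String.ofList s), p)
     | (none, _) => fb)
    = (if PySem.Chars.findFrom cs delim (k : Int) none = -1 then fb
       else (some (String.ofList (PySem.List.slice cs (some (k : Int)) (some (PySem.Chars.findFrom cs delim (k : Int) none)))),
             PySem.Chars.findFrom cs delim (k : Int) none + (delim.length : Int))) := by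
  rw [pvScan_eq cs delim hd k hk []]
  rw [PySem.Chars.findFrom_natCast cs delim k hk]
  by_cases hf : PySem.Chars.find (cs.drop k) delim = -1
  · simp [hf]
  · have hr0 : 0 ≤ PySem.Chars.find (cs.drop k) delim := by
      have := PySem.Chars.neg_one_le_find (cs.drop k) delim
      omega
    rw [if_neg hf, if_neg hf, if_neg (by omega)]
    have hcast : PySem.Chars.find (cs.drop k) delim = ((PySem.Chars.find (cs.drop k) delim).toNat : Int) := by omega
    have hslice : PySem.List.slice cs (some (k : Int)) (some ((k : Int) + PySem.Chars.find (cs.drop k) delim))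
        = (cs.drop k).take (PySem.Chars.find (cs.drop k) delim).toNat := by
      conv_lhs => rw [hcast]
      rw [PySem.List.slice_natCast_add]
    simp [hslice]

-- taking lstrip lengths gives the same run lengths as A's loops
lemma pvRun_len (cs : List Char) (n : Nat) :
    ((cs.drop n).dropWhile pvSepB).length + pvRun cs n = (cs.drop n).length := by
  unfold pvRun
  have := congrArg List.length (List.takeWhile_append_dropWhile (p := pvSepB) (l := cs.drop n))
  simp only [List.length_append] at this
  omega

lemma pvERun_len (cs : List Char) (n : Nat) :
    ((cs.drop n).dropWhile (fun c => c == '=')).length + pvERun cs n = (cs.drop n).length := by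
  unfold pvERun
  have := congrArg List.length (List.takeWhile_append_dropWhile (p := fun c => c == '=') (l := cs.drop n))
  simp only [List.length_append] at this
  omega

-- the quote fall-throughs agree
lemma pvQuote_eq (cs : List Char) (m : Nat) (hm : m < cs.length) (c : Char) :
    pvQuoteA cs (m : Int) c = pvQuoteB cs (m : Int) c := by
  unfold pvQuoteA pvQuoteB
  by_cases hq : c = '"' ∨ c = '\''
  · rw [if_pos hq, if_pos hq]
    have h1 : ((m : Int) + 1) = ((m + 1 : Nat) : Int) := by push_cast; ring
    have key := pvFindScan cs [c] (by simp) (m + 1) (by omega) ((none : Option String), (m : Int))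
    refine Eq.trans ?_ key.symm
    rw [h1]
    simp
  · rw [if_neg hq, if_neg hq]

lemma pvMain (text : String) (n : Nat) :
    extract_lua_longstring text (n : Int) = extract_lua_longstring_alt text (n : Int) := by
  simp only [extract_lua_longstring, extract_lua_longstring_alt]
  generalize text.toList = cs
  rw [pvSkipA_eq, PySem.List.slice_from_natCast]
  have hrun := pvRun_len cs n
  have hskip : (n : Int) + ((cs.drop n).length : Int) - (((cs.drop n).dropWhile pvSepB).length : Int)
      = ((n + pvRun cs n : Nat) : Int) := by push_cast; omega
  rw [hskip]
  set m := n + pvRun cs n with hm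
  by_cases hge : ((m : Nat) : Int) ≥ (cs.length : Int)
  · rw [if_pos hge, if_pos hge]
  · rw [if_neg hge, if_neg hge]
    have hmlt : m < cs.length := by omega
    have hget : PySem.List.pyGet? cs ((m : Nat) : Int) = some cs[m] := by
      simp [List.getElem?_eq_getElem hmlt]
    simp only [hget]
    by_cases hc : cs[m] = '['
    · rw [if_pos hc, if_pos hc]
      rw [pvEqLoopA_eq']
      dsimp only
      have h1 : ((m : Int) + 1) = ((m + 1 : Nat) : Int) := by push_cast; ring
      rw [h1, PySem.List.slice_from_natCast]
      have herun := pvERun_len cs (m + 1)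
      have hlev : ((cs.drop (m + 1)).length : Int) - (((cs.drop (m + 1)).dropWhile (fun c => c == '=')).length : Int)
          = ((pvERun cs (m + 1) : Nat) : Int) := by omega
      rw [hlev]
      set e := pvERun cs (m + 1) with he
      by_cases hopen : ((m + 1 : Nat) : Int) + (e : Int) < (cs.length : Int) ∧
          PySem.List.pyGet? cs (((m + 1 : Nat) : Int) + (e : Int)) = some '['
      · rw [if_pos hopen, if_pos hopen]
        have hlt := hopen.1
        have hlen2 : m + 2 + e ≤ cs.length := by omega
        have key := pvFindScan cs (']' :: (List.replicate e '=' ++ [']'])) (by simp) (m + 2 + e)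
          hlen2 ((none : Option String), ((m : Nat) : Int))
        rw [show (((m + 1 : Nat) : Int) + (e : Int) + 1) = ((m + 2 + e : Nat) : Int) by push_cast; ring]
        rw [show ((m : Int) + 2 + (e : Int)) = ((m + 2 + e : Nat) : Int) by push_cast; ring]
        rw [Int.toNat_natCast]
        exact key.symm
      · rw [if_neg hopen, if_neg hopen]
        exact pvQuote_eq cs m hmlt cs[m]
    · rw [if_neg hc, if_neg hc]
      exact pvQuote_eq cs m hmlt cs[m]

-- ===== VERDICT (by name: the statement is the Claim_ definition above) =====
theorem extract_lua_longstring_spec : Claim_equal_extract_lua_longstring := by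
  intro text pos _ hpre
  unfold Pre_extract_lua_longstring at hpre
  unfold Spec_extract_lua_longstring
  obtain ⟨n, rfl⟩ : ∃ k : Nat, pos = (k : Int) := ⟨pos.toNat, by omega⟩
  exact pvMain text n
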